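-- pv_equiv track=rewrite | github.com/sehyungp92/trading_assistant | orchestrator/handlers.py | _feedback_tag
-- ===== SOURCE A (Python) =====
-- def _feedback_tag(prefix: str, value: str) -> str:
--     text = str(value or "").strip().lower()
--     if not text:
--         return ""
--     chars: list[str] = []
--     prev_sep = False
--     for char in text:
--         if char.isalnum():
--             chars.append(char)
--             prev_sep = False
--         elif not prev_sep:
--             chars.append("_")
--             prev_sep = True
--     slug = "".join(chars).strip("_")
--     return f"{prefix}:{slug}" if slug else ""
-- ===== SOURCE B (Python) =====
-- def _feedback_tag(prefix: str, value: str) -> str: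
--     text = str(value or "").strip().lower()
--     if not text:
--         return ""
--     # collect the maximal alphanumeric runs, then join them with single underscores:
--     # separator runs collapse and edge separators vanish by construction (no strip needed)
--     runs: list[str] = []
--     i, n = 0, len(text)
--     while i < n:
--         if text[i].isalnum():
--             j = i
--             while j < n and text[j].isalnum():
--                 j += 1
--             runs.append(text[i:j])
--             i = j
--         else:
--             i += 1
--     slug = "_".join(runs)
--     return f"{prefix}:{slug}" if slug else ""
-- ===== Notes on version B (the rewrite author's own statement) =====
-- stated objective: alternative
-- what changed: Instead of a char-by-char accumulator with a prev_sep flag followed by strip('_'), B extracts the maximal alphanumeric runs and joins them with '_', so separator collapsing and edge trimming fall out of the decomposition.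
import Mathlib
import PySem

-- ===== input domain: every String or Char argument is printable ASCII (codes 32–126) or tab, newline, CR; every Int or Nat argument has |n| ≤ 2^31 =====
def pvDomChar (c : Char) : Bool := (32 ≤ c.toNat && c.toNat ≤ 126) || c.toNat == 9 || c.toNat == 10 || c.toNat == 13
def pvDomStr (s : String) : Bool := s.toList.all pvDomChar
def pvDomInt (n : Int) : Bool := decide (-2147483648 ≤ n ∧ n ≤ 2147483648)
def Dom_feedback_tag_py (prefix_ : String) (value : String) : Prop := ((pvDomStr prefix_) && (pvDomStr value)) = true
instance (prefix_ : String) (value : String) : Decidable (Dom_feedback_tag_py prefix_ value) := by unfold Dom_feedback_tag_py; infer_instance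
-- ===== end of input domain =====

-- B replaces A's char-by-char accumulator with prev_sep flag + strip('_') by extracting the maximal
-- alphanumeric runs and joining them with '_' (objective: alternative decomposition, same cost).

-- ===== PORT A =====
def feedback_tag_py (prefix_ : String) (value : String) : String :=
  -- text = str(value or "").strip().lower()
  let text : List Char :=
    PySem.Chars.lower (PySem.Chars.strip (if value == "" then "" else value).toList)
  if text = [] then ""
  else
    -- the for-loop over text with accumulators (chars, prev_sep)
    let st := text.foldl
      (fun (s : List Char × Bool) (c : Char) =>
        if PySem.Chars.isalnum c then (s.1 ++ [c], false)
        else if s.2 then s else (s.1 ++ ['_'], true))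
      ([], false)
    let slug := PySem.Chars.stripChars st.1 ['_']
    if slug = [] then "" else String.ofList (prefix_.toList ++ ':' :: slug)

-- ===== PORT B =====
-- transliteration of Source B's while loop: the inner 'while j < n and text[j].isalnum(): j += 1'
-- scan plus the slice text[i:j] is exactly takeWhile/dropWhile on the remaining characters
def bRuns (cs : List Char) : List (List Char) :=
  match cs with
  | [] => []
  | c :: rest =>
    if PySem.Chars.isalnum c then
      (c :: rest.takeWhile PySem.Chars.isalnum) :: bRuns (rest.dropWhile PySem.Chars.isalnum)
    else bRuns rest
termination_by cs.length
decreasing_by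
  · exact Nat.lt_succ_of_le (List.length_dropWhile_le _ _)
  · simp

def feedback_tag_py_alt (prefix_ : String) (value : String) : String :=
  let text : List Char :=
    PySem.Chars.lower (PySem.Chars.strip (if value == "" then "" else value).toList)
  if text = [] then ""
  else
    let slug := PySem.Chars.join ['_'] (bRuns text)
    if slug = [] then "" else String.ofList (prefix_.toList ++ ':' :: slug)

-- ===== PRECONDITION & SPEC =====
def Spec_feedback_tag_py (prefix_ : String) (value : String) (out : String) : Prop := out = feedback_tag_py_alt prefix_ value
instance (prefix_ : String) (value : String) (out : String) : Decidable (Spec_feedback_tag_py prefix_ value out) := by unfold Spec_feedback_tag_py; infer_instance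

-- ===== CLAIM (what is proved, stated in full; the proofs are below) =====
def Claim_equal_feedback_tag_py : Prop := ∀ (prefix_ : String) (value : String), Dom_feedback_tag_py prefix_ value → Spec_feedback_tag_py prefix_ value (feedback_tag_py prefix_ value)

-- ===== LEMMAS AND PROOFS =====

-- recursive form of A's loop output (the chars list), parametrised by prev_sep
def fRec : List Char → Bool → List Char
  | [], _ => []
  | c :: cs, prev =>
    if PySem.Chars.isalnum c then c :: fRec cs false
    else if prev then fRec cs prev else '_' :: fRec cs true

lemma foldA (ts : List Char) : ∀ (acc : List Char) (prev : Bool),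
    (ts.foldl
      (fun (s : List Char × Bool) (c : Char) =>
        if PySem.Chars.isalnum c then (s.1 ++ [c], false)
        else if s.2 then s else (s.1 ++ ['_'], true))
      (acc, prev)).1 = acc ++ fRec ts prev := by
  induction ts with
  | nil => intro acc prev; simp [fRec]
  | cons c ts ih =>
    intro acc prev
    by_cases h : PySem.Chars.isalnum c
    · simp [fRec, h, ih]
    · cases prev <;> simp [fRec, h, ih]

def leadOf (cs : List Char) : List Char :=
  match cs with
  | [] => []
  | c :: _ => if PySem.Chars.isalnum c then [] else ['_']

def tailOf (cs : List Char) : List Char :=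
  if cs.any PySem.Chars.isalnum && !(PySem.Chars.isalnum (cs.getLast?.getD 'a')) then ['_'] else []

lemma fRec_false (cs : List Char) : fRec cs false = leadOf cs ++ fRec cs true := by
  cases cs with
  | nil => rfl
  | cons c cs => by_cases h : PySem.Chars.isalnum c <;> simp [fRec, leadOf, h]

lemma bRuns_eq_nil_iff (cs : List Char) : bRuns cs = [] ↔ cs.any PySem.Chars.isalnum = false := by
  induction cs using bRuns.induct with
  | case1 => simp [bRuns]
  | case2 c rest h ih => simp [bRuns, h]
  | case3 c rest h ih => simp [bRuns, h, ih]

lemma fRec_alnum_prefix (t : List Char) (d : List Char)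
    (h : ∀ c ∈ t, PySem.Chars.isalnum c = true) :
    fRec (t ++ d) false = t ++ fRec d false := by
  induction t with
  | nil => rfl
  | cons c t ih =>
    have hc := h c (by simp)
    simp only [List.cons_append, fRec, hc, if_pos]
    rw [ih (fun x hx => h x (by simp [hx]))]

lemma dropWhile_head_false {p : Char → Bool} {l : List Char} {c : Char} {cs : List Char}
    (h : l.dropWhile p = c :: cs) : p c = false := by
  induction l with
  | nil => simp at h
  | cons a l ih =>
    by_cases ha : p a
    · rw [List.dropWhile_cons, if_pos ha] at h; exact ih h
    · rw [List.dropWhile_cons, if_neg ha] at h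
      cases h; simpa using ha

-- main characterisation of A's chars list (prev_sep = true start)
lemma isalnum_underscore : PySem.Chars.isalnum '_' = false := by decide

lemma join_ne_nil (q : List Char) (qs : List (List Char)) (hq : q ≠ []) :
    PySem.Chars.join ['_'] (q :: qs) ≠ [] := by
  cases qs with
  | nil => rw [PySem.Chars.join_singleton]; exact hq
  | cons p ps => rw [PySem.Chars.join_cons_cons]; simp [hq]

lemma fRec_true (cs : List Char) :
    fRec cs true = PySem.Chars.join ['_'] (bRuns cs) ++ tailOf cs := by
  induction cs using bRuns.induct with
  | case1 => simp [fRec, bRuns, tailOf, PySem.Chars.join_nil]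
  | case3 c rest h ih =>
    have h' : PySem.Chars.isalnum c = false := by simpa using h
    rw [show fRec (c :: rest) true = fRec rest true from by simp [fRec, h'], bRuns, if_neg h, ih]
    congr 1
    unfold tailOf
    cases rest with
    | nil => simp [h']
    | cons r rs =>
      have : (c :: r :: rs).getLast? = (r :: rs).getLast? :=
        List.getLast?_append_of_ne_nil [c] (by simp)
      rw [this]
      simp [h']
  | case2 c rest h ih =>
    have ht_al : ∀ x ∈ rest.takeWhile PySem.Chars.isalnum, PySem.Chars.isalnum x = true :=
      fun x hx => List.mem_takeWhile_imp hx
    have htd : rest = rest.takeWhile PySem.Chars.isalnum ++ rest.dropWhile PySem.Chars.isalnum :=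
      (List.takeWhile_append_dropWhile).symm
    rw [show fRec (c :: rest) true = c :: fRec rest false from by simp [fRec, h], bRuns, if_pos h]
    generalize hT : rest.takeWhile PySem.Chars.isalnum = t at *
    generalize hD : rest.dropWhile PySem.Chars.isalnum = d at *
    subst htd
    rw [show fRec (t ++ d) false = t ++ fRec d false from fRec_alnum_prefix t d ht_al,
      fRec_false, ih]
    have getlast_of_ne : ∀ (l : List Char), l ≠ [] → ∃ a, l.getLast? = some a ∧ a ∈ l := by
      intro l hl
      obtain ⟨a, ha⟩ := List.getLast?_isSome.mpr hl |> Option.isSome_iff_exists.mp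
      exact ⟨a, ha, List.mem_of_getLast? ha⟩
    cases d with
    | nil =>
      have hlast : PySem.Chars.isalnum ((c :: t).getLast?.getD 'a') = true := by
        obtain ⟨a, ha, hmem⟩ := getlast_of_ne (c :: t) (by simp)
        rw [ha]
        simp only [Option.getD_some]
        rcases List.mem_cons.mp hmem with rfl | hmem
        · exact h
        · exact ht_al a hmem
      have htail : tailOf (c :: (t ++ [])) = [] := by
        unfold tailOf
        simp only [List.append_nil]
        simp [hlast]
      simp only [List.append_nil] at htail ⊢
      simp [bRuns, leadOf, PySem.Chars.join_singleton, PySem.Chars.join_nil, htail,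
        show tailOf [] = [] from rfl]
    | cons d0 d' =>
      have hd0 : PySem.Chars.isalnum d0 = false := dropWhile_head_false hD
      have hlead : leadOf (d0 :: d') = ['_'] := by simp [leadOf, hd0]
      have hlast : (c :: (t ++ d0 :: d')).getLast? = (d0 :: d').getLast? :=
        List.getLast?_append_of_ne_nil (c :: t) (by simp)
      have hanyc : (c :: (t ++ d0 :: d')).any PySem.Chars.isalnum = true := by simp [h]
      by_cases hbd : bRuns (d0 :: d') = []
      · have hnoal : (d0 :: d').any PySem.Chars.isalnum = false := (bRuns_eq_nil_iff _).mp hbd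
        have htd0 : tailOf (d0 :: d') = [] := by unfold tailOf; simp [hnoal]
        have hlastd : PySem.Chars.isalnum ((d0 :: d').getLast?.getD 'a') = false := by
          obtain ⟨a, ha, hmem⟩ := getlast_of_ne (d0 :: d') (by simp)
          rw [ha]
          simpa using Bool.eq_false_iff.mpr ((List.any_eq_false.mp hnoal) a hmem)
        have htailc : tailOf (c :: (t ++ d0 :: d')) = ['_'] := by
          unfold tailOf; rw [hlast]; simp [hanyc, hlastd]
        rw [hbd, htd0, htailc, hlead, PySem.Chars.join_nil, PySem.Chars.join_singleton]
        simp
      · obtain ⟨x, xs, hx⟩ := List.exists_cons_of_ne_nil hbd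
        have htails : tailOf (d0 :: d') = tailOf (c :: (t ++ d0 :: d')) := by
          unfold tailOf
          rw [hlast, hanyc]
          have hanyd : (d0 :: d').any PySem.Chars.isalnum = true := by
            by_contra hc
            exact hbd ((bRuns_eq_nil_iff _).mpr (Bool.eq_false_iff.mpr hc))
          rw [hanyd]
        rw [hx, PySem.Chars.join_cons_cons, ← hx, hlead, htails]
        simp

-- every run B extracts is a nonempty list of alnum chars
lemma bRuns_props (cs : List Char) :
    ∀ r ∈ bRuns cs, r ≠ [] ∧ ∀ ch ∈ r, PySem.Chars.isalnum ch = true := by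
  induction cs using bRuns.induct with
  | case1 => simp [bRuns]
  | case2 c rest h ih =>
    intro r hr
    rw [bRuns, if_pos h, List.mem_cons] at hr
    rcases hr with hr | hr
    · subst hr
      refine ⟨by simp, ?_⟩
      intro ch hch
      rcases List.mem_cons.mp hch with h1 | h1
      · subst h1; exact h
      · exact List.mem_takeWhile_imp h1
    · exact ih r hr
  | case3 c rest h ih =>
    intro r hr; rw [bRuns, if_neg h] at hr; exact ih r hr

-- the joined slug never starts with '_'
lemma join_head (rs : List (List Char))
    (h : ∀ r ∈ rs, r ≠ [] ∧ ∀ ch ∈ r, PySem.Chars.isalnum ch = true) :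
    (PySem.Chars.join ['_'] rs).head? ≠ some '_' := by
  cases rs with
  | nil => rw [PySem.Chars.join_nil]; simp
  | cons r rest =>
    have hr := h r (by simp)
    obtain ⟨m, ms, rfl⟩ := List.exists_cons_of_ne_nil hr.1
    have hm : PySem.Chars.isalnum m = true := hr.2 m (by simp)
    have hmu : ¬ (m = '_') := by
      intro e; rw [e, isalnum_underscore] at hm; exact Bool.false_ne_true hm
    cases rest with
    | nil => rw [PySem.Chars.join_singleton]; simpa using hmu
    | cons q qs => rw [PySem.Chars.join_cons_cons]; simpa using hmu

-- … nor ends with '_'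
lemma join_last (rs : List (List Char))
    (h : ∀ r ∈ rs, r ≠ [] ∧ ∀ ch ∈ r, PySem.Chars.isalnum ch = true) :
    (PySem.Chars.join ['_'] rs).getLast? ≠ some '_' := by
  induction rs with
  | nil => rw [PySem.Chars.join_nil]; simp
  | cons r rest ih =>
    cases rest with
    | nil =>
      rw [PySem.Chars.join_singleton]
      have hr := h r (by simp)
      rcases List.eq_nil_or_concat r with rfl | ⟨L, b, rfl⟩
      · exact absurd rfl hr.1
      · have hb : PySem.Chars.isalnum b = true := hr.2 b (by simp)
        rw [List.concat_eq_append, List.getLast?_concat]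
        intro e
        rw [Option.some_inj.mp e, isalnum_underscore] at hb
        exact Bool.false_ne_true hb
    | cons q qs =>
      rw [PySem.Chars.join_cons_cons]
      have hq : q ≠ [] := (h q (by simp)).1
      have hjn : PySem.Chars.join ['_'] (q :: qs) ≠ [] := join_ne_nil q qs hq
      have ihr := ih (fun x hx => h x (by simp [hx]))
      have h1 : (r ++ (['_'] ++ PySem.Chars.join ['_'] (q :: qs))).getLast?
          = (['_'] ++ PySem.Chars.join ['_'] (q :: qs)).getLast? :=
        List.getLast?_append_of_ne_nil r (by simp)
      have h2 : ((['_'] : List Char) ++ PySem.Chars.join ['_'] (q :: qs)).getLast?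
          = (PySem.Chars.join ['_'] (q :: qs)).getLast? :=
        List.getLast?_append_of_ne_nil ['_'] hjn
      rw [List.append_assoc, h1, h2]
      exact ihr

-- strip('_') removes exactly the optional edge underscores
lemma strip_decomp (lead mid tl : List Char)
    (hl : lead = [] ∨ lead = ['_']) (ht : tl = [] ∨ tl = ['_'])
    (hm1 : mid.head? ≠ some '_') (hm2 : mid.getLast? ≠ some '_') :
    PySem.Chars.stripChars (lead ++ mid ++ tl) ['_'] = mid := by
  by_cases hmid : mid = []
  · subst hmid
    rcases hl with rfl | rfl <;> rcases ht with rfl | rfl <;> decide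
  · obtain ⟨m, ms, rfl⟩ := List.exists_cons_of_ne_nil hmid
    have hm : ¬ (m = '_') := by simpa using hm1
    have hrev : (m :: ms).reverse ≠ [] := by simp
    obtain ⟨l, r, hlr⟩ := List.exists_cons_of_ne_nil hrev
    have hlast : (m :: ms).getLast? = some l := by
      rw [List.getLast?_eq_head?_reverse, hlr]; rfl
    have hl' : ¬ (l = '_') := by
      intro h; exact hm2 (by rw [hlast, h])
    unfold PySem.Chars.stripChars
    show (List.dropWhile (fun c => (['_'] : List Char).contains c)
        ((List.dropWhile (fun c => (['_'] : List Char).contains c) (lead ++ (m :: ms) ++ tl)).reverse)).reverse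
        = m :: ms
    have step1 : List.dropWhile (fun c => (['_'] : List Char).contains c) (lead ++ (m :: ms) ++ tl)
        = (m :: ms) ++ tl := by
      rcases hl with rfl | rfl <;> simp [hm]
    rw [step1]
    have step2 : (m :: ms ++ tl).reverse = tl.reverse ++ (l :: r) := by
      rw [← hlr]; simp
    rw [step2]
    have step3 : List.dropWhile (fun c => (['_'] : List Char).contains c) (tl.reverse ++ (l :: r))
        = l :: r := by
      rcases ht with rfl | rfl <;> simp [hl']
    rw [step3, ← hlr, List.reverse_reverse]

-- ===== VERDICT (by name: the statement is the Claim_ definition above) =====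
theorem feedback_tag_py_spec : Claim_equal_feedback_tag_py := by
  intro prefix_ value _
  unfold Spec_feedback_tag_py feedback_tag_py feedback_tag_py_alt
  set text := PySem.Chars.lower (PySem.Chars.strip (if value == "" then "" else value).toList) with htext
  by_cases h0 : text = []
  · simp [h0]
  · simp only [if_neg h0]
    have hfold := foldA text [] false
    have hprops := bRuns_props text
    have hjoin1 := join_head (bRuns text) hprops
    have hjoin2 := join_last (bRuns text) hprops
    have hlead : leadOf text = [] ∨ leadOf text = ['_'] := by
      cases text with
      | nil => left; rfl
      | cons c cs =>
        by_cases h : PySem.Chars.isalnum c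
        · left; simp [leadOf, h]
        · right; simp [leadOf, h]
    have htail : tailOf text = [] ∨ tailOf text = ['_'] := by
      unfold tailOf; split <;> [right; left] <;> rfl
    have hslug : PySem.Chars.stripChars
        ((text.foldl
          (fun (s : List Char × Bool) (c : Char) =>
            if PySem.Chars.isalnum c then (s.1 ++ [c], false)
            else if s.2 then s else (s.1 ++ ['_'], true))
          ([], false)).1) ['_'] = PySem.Chars.join ['_'] (bRuns text) := by
      rw [hfold]
      simp only [List.nil_append]
      rw [fRec_false, fRec_true, ← List.append_assoc]
      exact strip_decomp _ _ _ hlead htail hjoin1 hjoin2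
    rw [hslug]
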